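-- pv_equiv track=rewrite | github.com/rogeriosilva-ifpi/ifpi-ads-2026.1-algoritmos | API_01_13Abril_2026_Turma_Normal/PABLO_API_2026/q2_intervalo.py | obter_intervalo
-- ===== SOURCE A (Python) =====
-- def obter_intervalo(n, m):
--     divs = ''
--     somatorio = 0
--
--     for i in range(n, m):
--         if i % 2 != 0 and i % 3 == 0:
--             divs += ' ' + str(i)
--             somatorio += i
--
--     return divs, somatorio
-- ===== SOURCE B (Python) =====
-- def obter_intervalo(n, m):
--     start = n + (3 - n) % 6
--     vals = range(start, m, 6)
--     divs = ''.join(' ' + str(i) for i in vals)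
--     k = len(vals)
--     return divs, k * start + 3 * k * (k - 1)
-- ===== Notes on version B (the rewrite author's own statement) =====
-- stated objective: alternative
-- what changed: Instead of scanning every integer in range(n, m) and filtering with i%2!=0 and i%3==0, B computes the first value congruent to 3 mod 6 and strides over range(start, m, 6) with no branch, building the string with ''.join and the sum with the arithmetic-series closed form k*start+3*k*(k-1).
import Mathlib
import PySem

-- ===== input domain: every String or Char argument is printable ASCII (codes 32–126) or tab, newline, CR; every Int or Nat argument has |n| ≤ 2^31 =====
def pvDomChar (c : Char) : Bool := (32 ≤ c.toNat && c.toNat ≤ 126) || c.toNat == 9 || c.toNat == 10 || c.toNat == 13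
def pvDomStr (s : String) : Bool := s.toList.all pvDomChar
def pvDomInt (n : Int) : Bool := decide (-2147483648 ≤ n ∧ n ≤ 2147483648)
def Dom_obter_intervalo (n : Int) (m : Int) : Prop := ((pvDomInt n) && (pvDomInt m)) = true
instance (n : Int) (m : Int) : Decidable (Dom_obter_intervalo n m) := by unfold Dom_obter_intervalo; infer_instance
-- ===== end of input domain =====

-- B strides directly over the ≡ 3 (mod 6) values with a closed-form sum instead of
-- scanning every integer and filtering (objective: simpler/alternative; same asymptotics).

-- ===== PORT A =====
-- for i in range(n, m): if i % 2 != 0 and i % 3 == 0: divs += ' ' + str(i); somatorio += i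
def obter_intervalo (n : Int) (m : Int) : String × Int :=
  (PySem.List.pyRange n m 1).foldl
    (fun st i =>
      if PySem.Int.mod i 2 ≠ 0 ∧ PySem.Int.mod i 3 = 0 then
        (st.1 ++ " " ++ PySem.Int.toStr i, st.2 + i)
      else st)
    ("", 0)

-- ===== PORT B =====
-- start = n + (3 - n) % 6; vals = range(start, m, 6); divs = ''.join(' ' + str(i) for i in vals);
-- k = len(vals); return divs, k * start + 3 * k * (k - 1)
def obter_intervalo_alt (n : Int) (m : Int) : String × Int :=
  let start := n + PySem.Int.mod (3 - n) 6
  let vals := PySem.List.pyRange start m 6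
  let divs := PySem.Str.join "" (vals.map (fun i => " " ++ PySem.Int.toStr i))
  let k : Int := (vals.length : Int)
  (divs, k * start + 3 * k * (k - 1))

-- ===== PRECONDITION & SPEC =====
def Spec_obter_intervalo (n : Int) (m : Int) (out : String × Int) : Prop := out = obter_intervalo_alt n m
instance (n : Int) (m : Int) (out : String × Int) : Decidable (Spec_obter_intervalo n m out) := by unfold Spec_obter_intervalo; infer_instance

-- ===== CLAIM (what is proved, stated in full; the proofs are below) =====
def Claim_equal_obter_intervalo : Prop := ∀ (n : Int) (m : Int), Dom_obter_intervalo n m → Spec_obter_intervalo n m (obter_intervalo n m)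

-- ===== LEMMAS AND PROOFS =====

-- ''.join over a cons splits off the head as plain concatenation.
lemma joinEmpty (s : String) (l : List String) :
    PySem.Str.join "" (s :: l) = s ++ PySem.Str.join "" l := by
  cases l with
  | nil => simp [PySem.Str.join, PySem.Chars.join, List.intercalate]
  | cons t r => simp [PySem.Str.join, PySem.Chars.join, List.intercalate]

-- structural cons/nil form of a step-6 range
lemma pyRange6_cons (a b : Int) (h : a < b) :
    PySem.List.pyRange a b 6 = a :: PySem.List.pyRange (a + 6) b 6 := by
  rw [PySem.List.pyRange_of_pos a b (by norm_num : (0:Int) < 6),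
      PySem.List.pyRange_of_pos (a+6) b (by norm_num : (0:Int) < 6)]
  by_cases h6 : a + 6 < b
  · have hc : ((b - a + 6 - 1) / 6).toNat
        = ((b - (a + 6) + 6 - 1) / 6).toNat + 1 := by omega
    simp only [if_pos h, if_pos h6, hc, List.range_succ_eq_map, List.map_cons, List.map_map,
      List.cons.injEq]
    constructor
    · ring
    · apply List.map_congr_left; intro k _; simp; ring
  · have hc : ((b - a + 6 - 1) / 6).toNat = 1 := by omega
    simp [if_pos h, if_neg h6, hc, List.range_succ]

lemma pyRange6_nil (a b : Int) (h : b ≤ a) :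
    PySem.List.pyRange a b 6 = [] := by
  rw [PySem.List.pyRange_of_pos a b (by norm_num : (0:Int) < 6)]
  simp [if_neg (by omega : ¬ a < b)]

-- the plain fold over any list splits into join-of-map and the list sum
lemma foldPlain (xs : List Int) (a : String) (b : Int) :
    xs.foldl (fun (st : String × Int) i => (st.1 ++ " " ++ PySem.Int.toStr i, st.2 + i)) (a, b)
      = (a ++ PySem.Str.join "" (xs.map (fun i => " " ++ PySem.Int.toStr i)), b + xs.sum) := by
  induction xs generalizing a b with
  | nil => simp [PySem.Str.join, PySem.Chars.join, List.intercalate]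
  | cons x r ih =>
    simp only [List.foldl_cons, ih, List.map_cons, joinEmpty, List.sum_cons, Prod.mk.injEq]
    constructor
    · simp [String.append_assoc]
    · ring

-- sum of the step-6 range in closed form
lemma sum6 (N : Nat) : ∀ a b : Int, (b - a).toNat ≤ N →
    (PySem.List.pyRange a b 6).sum
      = ((PySem.List.pyRange a b 6).length : Int) * a
        + 3 * ((PySem.List.pyRange a b 6).length : Int) * (((PySem.List.pyRange a b 6).length : Int) - 1) := by
  induction N with
  | zero =>
    intro a b h
    rw [pyRange6_nil a b (by omega)]; simp
  | succ N ih =>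
    intro a b h
    by_cases hab : a < b
    · rw [pyRange6_cons a b hab, List.sum_cons, List.length_cons,
          ih (a + 6) b (by omega)]
      push_cast; ring
    · rw [pyRange6_nil a b (by omega)]; simp

-- A's filtering scan over range(n, m) equals the plain fold over the step-6 range
lemma scan_eq (N : Nat) : ∀ n m : Int, (m - n).toNat ≤ N → ∀ acc : String × Int,
    (PySem.List.pyRange n m 1).foldl
      (fun st i =>
        if PySem.Int.mod i 2 ≠ 0 ∧ PySem.Int.mod i 3 = 0 then
          (st.1 ++ " " ++ PySem.Int.toStr i, st.2 + i)
        else st) acc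
    = (PySem.List.pyRange (n + PySem.Int.mod (3 - n) 6) m 6).foldl
        (fun (st : String × Int) i => (st.1 ++ " " ++ PySem.Int.toStr i, st.2 + i)) acc := by
  induction N with
  | zero =>
    intro n m h acc
    rw [PySem.List.pyRange_one_eq_nil (by omega),
        pyRange6_nil _ m (by
          have e6 : PySem.Int.mod (3 - n) 6 = (3 - n) % 6 := PySem.Int.mod_eq_emod_of_pos (by norm_num)
          omega)]
    rfl
  | succ N ih =>
    intro n m h acc
    by_cases hnm : n < m
    · rw [PySem.List.pyRange_one_cons hnm, List.foldl_cons]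
      have e2 : PySem.Int.mod n 2 = n % 2 := PySem.Int.mod_eq_emod_of_pos (by norm_num)
      have e3 : PySem.Int.mod n 3 = n % 3 := PySem.Int.mod_eq_emod_of_pos (by norm_num)
      have e6 : PySem.Int.mod (3 - n) 6 = (3 - n) % 6 := PySem.Int.mod_eq_emod_of_pos (by norm_num)
      have e6' : PySem.Int.mod (3 - (n + 1)) 6 = (3 - (n + 1)) % 6 := PySem.Int.mod_eq_emod_of_pos (by norm_num)
      by_cases h3 : n % 6 = 3
      · have hp : PySem.Int.mod n 2 ≠ 0 ∧ PySem.Int.mod n 3 = 0 := by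
          constructor <;> omega
        rw [if_pos hp, ih (n + 1) m (by omega)]
        have hs : n + PySem.Int.mod (3 - n) 6 = n := by omega
        have hs' : n + 1 + PySem.Int.mod (3 - (n + 1)) 6 = n + 6 := by omega
        rw [hs, hs', pyRange6_cons n m hnm, List.foldl_cons]
      · have hp : ¬ (PySem.Int.mod n 2 ≠ 0 ∧ PySem.Int.mod n 3 = 0) := by omega
        rw [if_neg hp, ih (n + 1) m (by omega)]
        have hs : n + 1 + PySem.Int.mod (3 - (n + 1)) 6 = n + PySem.Int.mod (3 - n) 6 := by omega
        rw [hs]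
    · rw [PySem.List.pyRange_one_eq_nil (by omega),
        pyRange6_nil _ m (by
          have e6 : PySem.Int.mod (3 - n) 6 = (3 - n) % 6 := PySem.Int.mod_eq_emod_of_pos (by norm_num)
          omega)]
      rfl

-- ===== VERDICT (by name: the statement is the Claim_ definition above) =====
theorem obter_intervalo_spec : Claim_equal_obter_intervalo := by
  intro n m _
  show obter_intervalo n m = obter_intervalo_alt n m
  unfold obter_intervalo obter_intervalo_alt
  rw [scan_eq (m - n).toNat n m (le_refl _) ("", 0), foldPlain,
      sum6 (m - (n + PySem.Int.mod (3 - n) 6)).toNat _ m (le_refl _)]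
  show _ = (_, _)
  simp only [Prod.mk.injEq]
  constructor
  · rw [String.empty_append]
  · ring
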